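-- pv_equiv track=rewrite | github.com/simonicarlo/PythonScripts | DomainCheck/main.py | make_domains
-- ===== SOURCE A (Python) =====
-- def get_combs(a):
--     if len(a) == 0:
--         return [[]]
--     cs = []
--     for c in get_combs(a[1:]):
--         cs += [c, c + [a[0]]]
--     return cs
--
-- def get_permuts(lst):
--     if len(lst) == 0:
--         return []
--     if len(lst) == 1:
--         return [lst]
--     l = []
--
--     for i in range(len(lst)):
--         m = lst[i]
--         remLst = lst[:i] + lst[i + 1:]
--
--         for p in get_permuts(remLst):
--             l.append([m] + p)
--
--     return l
--
-- def make_domains(words, extensions):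
--     domains = []
--     permutations = []
--
--     combinations = get_combs(words)
--     for comb in combinations:
--         permutations += get_permuts(comb)
--
--     for permutationList in permutations:
--         permutation = ""
--         for perm in permutationList:
--             permutation += perm
--         for extension in extensions:
--             domains.append(permutation + extension)
--     return domains
-- ===== SOURCE B (Python) =====
-- def make_domains(words, extensions):
--     # Iterative (loop-based) re-implementation: subsets by interleaved doubling
--     # over reversed(words), permutations by a BFS frontier of (chosen, remaining)
--     # states, and the output strings built in one fused pass.
--     combos = [[]]
--     for w in reversed(words):
--         combos = [x for c in combos for x in (c, c + [w])]
--     domains = []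
--     for combo in combos:
--         if not combo:
--             continue
--         states = [([], combo)]
--         for _ in combo:
--             states = [(chosen + [x], rest[:j] + rest[j + 1:])
--                       for (chosen, rest) in states
--                       for j, x in enumerate(rest)]
--         for chosen, _ in states:
--             s = "".join(chosen)
--             for e in extensions:
--                 domains.append(s + e)
--     return domains
-- ===== Notes on version B (the rewrite author's own statement) =====
-- stated objective: alternative
-- what changed: Replaces both recursive helpers by loops: subsets are built by interleaved doubling over reversed(words), permutations by an iterative BFS frontier of (chosen, remaining) states, and domains are emitted in one fused pass that skips the empty subset.
import Mathlib
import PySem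

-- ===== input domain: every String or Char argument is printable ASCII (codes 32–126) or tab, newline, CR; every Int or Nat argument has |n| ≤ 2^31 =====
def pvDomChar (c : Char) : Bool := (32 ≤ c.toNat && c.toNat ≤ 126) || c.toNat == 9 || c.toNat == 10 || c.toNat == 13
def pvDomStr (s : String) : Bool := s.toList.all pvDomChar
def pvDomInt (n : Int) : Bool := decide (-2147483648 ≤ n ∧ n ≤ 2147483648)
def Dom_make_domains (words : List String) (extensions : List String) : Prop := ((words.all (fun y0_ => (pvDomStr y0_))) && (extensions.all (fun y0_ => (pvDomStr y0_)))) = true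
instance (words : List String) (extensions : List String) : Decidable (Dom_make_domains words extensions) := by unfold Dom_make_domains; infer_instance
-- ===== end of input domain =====

-- B replaces A's two recursive helpers by loops (interleaved doubling over reversed(words)
-- for the subsets, an iterative BFS frontier of (chosen, remaining) states for the
-- permutations) and emits the domain strings in one fused pass; objective: alternative.


-- ===== PORT A =====
-- get_combs: recursion on a (a[1:] = tail, a[0] = head); 'cs += [c, c + [a[0]]]' is a foldl append
def get_combs : List String → List (List String)
  | [] => [[]]
  | a0 :: rest => (get_combs rest).foldl (fun cs c => cs ++ [c, c ++ [a0]]) []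

-- get_permuts: the 'for i in range(len(lst))' loop is permLoop with accumulator l;
-- i is always in [0, len(lst)), so lst[i] = getD i "" and lst[:i] + lst[i+1:] = take i ++ drop (i+1) exactly
mutual
def get_permuts (lst : List String) : List (List String) :=
  if lst.length = 0 then []
  else if lst.length = 1 then [lst]
  else permLoop lst 0 []
termination_by ((lst.length, 1, 0) : Nat × Nat × Nat)

def permLoop (lst : List String) (i : Nat) (l : List (List String)) : List (List String) :=
  if _h : i < lst.length then
    let m := lst.getD i ""
    let remLst := lst.take i ++ lst.drop (i + 1)
    permLoop lst (i + 1) (l ++ (get_permuts remLst).map (fun p => m :: p))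
  else l
termination_by ((lst.length, 0, lst.length - i) : Nat × Nat × Nat)
end

def make_domains (words : List String) (extensions : List String) : List String :=
  let combinations := get_combs words
  let permutations := combinations.foldl (fun ps comb => ps ++ get_permuts comb) []
  permutations.foldl (fun domains pl =>
    let permutation := pl.foldl (fun s p => s ++ p) ""
    extensions.foldl (fun d e => d ++ [permutation ++ e]) domains) []

-- ===== PORT B =====
-- 'for j, x in enumerate(rest)': j is always in [0, len(rest)), so the element-index pairs
-- are rest.zipIdx and rest[:j] + rest[j+1:] = take j ++ drop (j+1), exact here;
-- ''.join = String.join; the two list comprehensions are flatMap/map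
def make_domains_alt (words : List String) (extensions : List String) : List String :=
  let combos := words.reverse.foldl (fun cs w => cs.flatMap (fun c => [c, c ++ [w]])) [[]]
  combos.foldl (fun domains combo =>
    if combo = [] then domains
    else
      let states := combo.foldl
        (fun st _ => st.flatMap (fun cr =>
          cr.2.zipIdx.map (fun xj =>
            (cr.1 ++ [xj.1], cr.2.take xj.2 ++ cr.2.drop (xj.2 + 1)))))
        [(([] : List String), combo)]
      states.foldl (fun d cr =>
        let s := String.join cr.1
        extensions.foldl (fun d e => d ++ [s ++ e]) d) domains) []

-- ===== PRECONDITION & SPEC =====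
def Spec_make_domains (words : List String) (extensions : List String) (out : List String) : Prop := out = make_domains_alt words extensions
instance (words : List String) (extensions : List String) (out : List String) : Decidable (Spec_make_domains words extensions out) := by unfold Spec_make_domains; infer_instance

-- ===== CLAIM (what is proved, stated in full; the proofs are below) =====
def Claim_equal_make_domains : Prop := ∀ (words : List String) (extensions : List String), Dom_make_domains words extensions → Spec_make_domains words extensions (make_domains words extensions)

-- ===== LEMMAS AND PROOFS =====

-- A's index loop, characterised as a flatMap over the remaining index range
theorem permLoop_eq (lst : List String) (i : Nat) (l : List (List String)) :
    permLoop lst i l = l ++ (List.range' i (lst.length - i)).flatMap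
      (fun j => (get_permuts (lst.take j ++ lst.drop (j + 1))).map
        (fun p => lst.getD j "" :: p)) := by
  suffices H : ∀ k i l, lst.length - i = k → permLoop lst i l = l ++ (List.range' i (lst.length - i)).flatMap
      (fun j => (get_permuts (lst.take j ++ lst.drop (j + 1))).map
        (fun p => lst.getD j "" :: p)) from H _ i l rfl
  intro k
  induction k with
  | zero =>
      intro i l h0
      have hi : ¬ i < lst.length := by omega
      rw [permLoop, dif_neg hi, h0]
      simp
  | succ m ih =>
      intro i l h
      have hi : i < lst.length := by omega
      rw [permLoop, dif_pos hi]
      rw [ih (i + 1) _ (by omega)]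
      rw [h, List.range'_succ, List.flatMap_cons]
      have h2 : lst.length - (i + 1) = m := by omega
      rw [h2, List.append_assoc]

-- get_permuts, extended to give [[]] on the empty list (the frontier's natural value)
def permsAux (lst : List String) : List (List String) :=
  if lst = [] then [[]] else get_permuts lst

theorem zipIdx_eq_range' {α : Type} (d : α) (l : List α) (s : Nat) :
    l.zipIdx s = (List.range' s l.length).map (fun j => (l.getD (j - s) d, j)) := by
  induction l generalizing s with
  | nil => rfl
  | cons a t ih =>
      rw [List.zipIdx_cons, List.length_cons, List.range'_succ, List.map_cons, ih]
      refine congrArg₂ _ (by simp) (List.map_congr_left ?_)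
      intro j hj
      have hs : s + 1 ≤ j := (List.mem_range'_1.mp hj).1
      have h1 : j - s = (j - (s + 1)) + 1 := by omega
      rw [h1]
      rfl

-- A's get_permuts on a nonempty list, written as one selection step
theorem get_permuts_eq_select (lst : List String) (h : lst ≠ []) :
    get_permuts lst = lst.zipIdx.flatMap
      (fun xj => (permsAux (lst.take xj.2 ++ lst.drop (xj.2 + 1))).map
        (fun p => xj.1 :: p)) := by
  match lst with
  | [x] =>
      rw [get_permuts]
      simp [permsAux, List.zipIdx_cons]
  | a :: b :: t =>
      rw [get_permuts]
      have h0 : ¬ (a :: b :: t).length = 0 := by simp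
      have h1 : ¬ (a :: b :: t).length = 1 := by simp
      rw [if_neg h0, if_neg h1, permLoop_eq]
      rw [zipIdx_eq_range' "" _ 0, List.flatMap_map]
      simp only [Nat.sub_zero, List.nil_append]
      apply List.flatMap_congr
      intro j hj
      have hjlt : j < (a :: b :: t).length := by
        have := (List.mem_range'_1.mp hj).2
        omega
      have hne : ((a :: b :: t).take j ++ (a :: b :: t).drop (j + 1)) ≠ [] := by
        intro hemp
        have := congrArg List.length hemp
        simp [List.length_take, List.length_drop] at this
        omega
      rw [permsAux, if_neg hne]

-- the frontier step of B's permutation loop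
def stepB (st : List (List String × List String)) : List (List String × List String) :=
  st.flatMap (fun cr =>
    cr.2.zipIdx.map (fun xj =>
      (cr.1 ++ [xj.1], cr.2.take xj.2 ++ cr.2.drop (xj.2 + 1))))

theorem iterate_stepB_nil (n : Nat) : stepB^[n] ([] : List (List String × List String)) = [] := by
  induction n with
  | zero => rfl
  | succ m ih => rw [Function.iterate_succ_apply, show stepB [] = [] from rfl, ih]

theorem iterate_stepB_append (n : Nat) (s t : List (List String × List String)) :
    stepB^[n] (s ++ t) = stepB^[n] s ++ stepB^[n] t := by
  induction n generalizing s t with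
  | zero => rfl
  | succ m ih =>
      rw [Function.iterate_succ_apply, Function.iterate_succ_apply, Function.iterate_succ_apply,
        show stepB (s ++ t) = stepB s ++ stepB t from List.flatMap_append, ih]

theorem iterate_stepB_flatMap (n : Nat) (l : List (List String × List String)) :
    stepB^[n] l = l.flatMap (fun cr => stepB^[n] [cr]) := by
  induction l with
  | nil => simpa using iterate_stepB_nil n
  | cons a t ih =>
      rw [show (a :: t) = [a] ++ t from rfl, iterate_stepB_append, ih, List.flatMap_append]
      simp

-- the frontier invariant: |lst| steps from (chosen, lst) give chosen ++ p for each permutation p of lst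
theorem frontier_eq (n : Nat) (lst : List String) (chosen : List String) (hn : lst.length = n) :
    stepB^[n] [(chosen, lst)] = (permsAux lst).map (fun p => (chosen ++ p, ([] : List String))) := by
  induction n using Nat.strong_induction_on generalizing lst chosen with
  | _ n ih =>
    match lst with
    | [] =>
        have h0 : n = 0 := by simpa using hn.symm
        subst h0
        simp [permsAux]
    | a :: t =>
        have hstep : stepB [(chosen, a :: t)] =
            (a :: t).zipIdx.map (fun xj =>
              (chosen ++ [xj.1], (a :: t).take xj.2 ++ (a :: t).drop (xj.2 + 1))) := by
          simp [stepB]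
        have hn' : n = t.length + 1 := by simpa using hn.symm
        subst hn'
        rw [Function.iterate_succ_apply, hstep, iterate_stepB_flatMap, List.flatMap_map]
        rw [show permsAux (a :: t) = get_permuts (a :: t) from if_neg (by simp),
          get_permuts_eq_select (a :: t) (by simp), List.map_flatMap]
        apply List.flatMap_congr
        intro xj hxj
        have hlt : xj.2 < (a :: t).length := by
          have := List.snd_lt_of_mem_zipIdx hxj
          simpa using this
        have hlen : ((a :: t).take xj.2 ++ (a :: t).drop (xj.2 + 1)).length = t.length := by
          simp [List.length_take, List.length_drop]
          simp at hlt
          omega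
        rw [ih t.length (by omega) _ _ hlen, List.map_map]
        apply List.map_congr_left
        intro p _
        simp

-- a foldl that ignores the elements is an iterate
theorem foldl_const_eq_iterate {α β : Type} (f : β → β) (l : List α) (init : β) :
    l.foldl (fun st _ => f st) init = f^[l.length] init := by
  induction l generalizing init with
  | nil => rfl
  | cons a t ih => simp [List.foldl_cons, ih, Function.iterate_succ_apply]

-- A's recursive subset enumeration = B's doubling loop over reversed words
theorem combs_eq (ws : List String) :
    get_combs ws = ws.reverse.foldl (fun cs w => cs.flatMap (fun c => [c, c ++ [w]])) [[]] := by
  induction ws with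
  | nil => rfl
  | cons a rest ih =>
      simp only [get_combs, List.reverse_cons, List.foldl_append, ← ih,
        PySem.List.foldl_append_eq_flatMap, List.foldl_cons, List.foldl_nil, List.nil_append]

-- emitting 'permutation + extension' for every extension, folded over a list of permutations
theorem foldl_emit {α : Type} (perms : List α) (exts : List String) (acc : List String)
    (j : α → String) :
    perms.foldl (fun domains pl => exts.foldl (fun d e => d ++ [j pl ++ e]) domains) acc
      = acc ++ perms.flatMap (fun pl => exts.map (fun e => j pl ++ e)) := by
  have h : (fun (domains : List String) (pl : α) =>
      exts.foldl (fun d e => d ++ [j pl ++ e]) domains)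
      = fun domains pl => domains ++ exts.map (fun e => j pl ++ e) := by
    funext d pl
    exact PySem.List.foldl_append_singleton_eq_map (l := exts) (f := fun e => j pl ++ e) (acc := d)
  rw [h, PySem.List.foldl_append_eq_flatMap]

theorem make_domains_eq (words extensions : List String) :
    make_domains words extensions = (get_combs words).flatMap
      (fun comb => (get_permuts comb).flatMap
        (fun pl => extensions.map (fun e => (pl.foldl (fun s p => s ++ p) "") ++ e))) := by
  simp only [make_domains]
  rw [PySem.List.foldl_append_eq_flatMap, List.nil_append]
  exact (foldl_emit _ extensions [] (fun pl : List String => pl.foldl (fun s p => s ++ p) "")).trans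
    (by rw [List.nil_append, List.flatMap_assoc])

theorem make_domains_alt_eq (words extensions : List String) :
    make_domains_alt words extensions = (get_combs words).flatMap
      (fun comb => (get_permuts comb).flatMap
        (fun pl => extensions.map (fun e => (pl.foldl (fun s p => s ++ p) "") ++ e))) := by
  simp only [make_domains_alt]
  rw [← combs_eq]
  have hbody : (fun (domains : List String) (combo : List String) =>
      if combo = [] then domains
      else
        (combo.foldl
          (fun st _ => st.flatMap (fun cr =>
            cr.2.zipIdx.map (fun xj =>
              (cr.1 ++ [xj.1], cr.2.take xj.2 ++ cr.2.drop (xj.2 + 1)))))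
          [(([] : List String), combo)]).foldl (fun d cr =>
            extensions.foldl (fun d e => d ++ [String.join cr.1 ++ e]) d) domains)
      = fun domains combo => domains ++ (get_permuts combo).flatMap
          (fun pl => extensions.map (fun e => (pl.foldl (fun s p => s ++ p) "") ++ e)) := by
    funext domains combo
    by_cases hc : combo = []
    · subst hc
      rw [if_pos rfl, show get_permuts [] = [] from by rw [get_permuts]; simp]
      simp
    · rw [if_neg hc]
      rw [show (fun (st : List (List String × List String)) (_ : String) => st.flatMap (fun cr =>
            cr.2.zipIdx.map (fun xj =>
              (cr.1 ++ [xj.1], cr.2.take xj.2 ++ cr.2.drop (xj.2 + 1))))) = fun st _ => stepB st from rfl,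
        foldl_const_eq_iterate, frontier_eq combo.length combo [] rfl,
        show permsAux combo = get_permuts combo from if_neg hc]
      simp only [List.nil_append]
      refine (foldl_emit _ extensions domains
        (fun cr : List String × List String => String.join cr.1)).trans ?_
      rw [List.flatMap_map]
      simp [String.join]
  rw [hbody, PySem.List.foldl_append_eq_flatMap, List.nil_append]

-- ===== VERDICT (by name: the statement is the Claim_ definition above) =====
theorem make_domains_spec : Claim_equal_make_domains := by
  intro words extensions _
  unfold Spec_make_domains
  rw [make_domains_eq, make_domains_alt_eq]
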